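-- pv_equiv track=rewrite | github.com/maratsanat/-Informatics_1sem- | 2semestr/3zadanie/task2.3.py | count
-- ===== SOURCE A (Python) =====
-- def count(p, text):
--     n = len(p)
--     if n == 0 or len(text) == 0:
--         return 0
--     s = [p[i:] + p[:i] for i in range(n)]
--     unique_s = set(s)
--     count = 0
--     s_len = n
--     text_len = len(text)
--     for shift in unique_s:
--         for i in range(text_len - s_len + 1):
--             if text[i:i+s_len] == shift:
--                 count += 1
--
--     return count
-- ===== SOURCE B (Python) =====
-- def count(p, text):
--     # scan the text once; instead of precomputing p's rotations, rotate each
--     # window back and compare against p directly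
--     n = len(p)
--     out = 0
--     for i in range(len(text) - n + 1):
--         w = text[i:i+n]
--         if n and any(w[k:] + w[:k] == p for k in range(n)):
--             out += 1
--     return out
-- ===== Notes on version B (the rewrite author's own statement) =====
-- stated objective: alternative
-- what changed: A precomputes the set of p's rotations and rescans the whole text once per distinct rotation; B never builds that set: it makes one pass over the text's windows and decides each window by rotating the window itself back over all shifts (early-exiting via any) and comparing with p — rotation is a symmetric relation.
import Mathlib
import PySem

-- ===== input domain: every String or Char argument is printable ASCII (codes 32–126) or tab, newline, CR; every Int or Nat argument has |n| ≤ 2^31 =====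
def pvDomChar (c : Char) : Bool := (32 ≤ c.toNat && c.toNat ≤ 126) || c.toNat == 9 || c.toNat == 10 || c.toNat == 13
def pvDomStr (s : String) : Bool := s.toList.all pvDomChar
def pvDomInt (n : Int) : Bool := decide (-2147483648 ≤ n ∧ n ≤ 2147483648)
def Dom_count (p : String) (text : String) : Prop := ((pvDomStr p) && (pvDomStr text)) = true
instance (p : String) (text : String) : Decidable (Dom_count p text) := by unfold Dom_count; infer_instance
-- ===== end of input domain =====

-- B replaces A's nested loops over distinct rotations by a single scan of the text
-- that rotates each window back and compares it to p (no rotation set is built).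


-- ===== PORT A =====
-- literal port of A: build all rotations of p, dedup into a set, then for each
-- distinct rotation scan every window of the text and count the matches
def count (p : String) (text : String) : Int :=
  let pl := p.toList
  let tl := text.toList
  let n := pl.length
  if n = 0 ∨ tl.length = 0 then 0
  else
    let s := (PySem.List.pyRange 0 (n : Int) 1).map
      (fun i => PySem.List.slice pl (some i) none ++ PySem.List.slice pl none (some i))
    let unique_s := PySem.Set.ofList s
    unique_s.foldl (fun c shift =>
      (PySem.List.pyRange 0 ((tl.length : Int) - (n : Int) + 1) 1).foldl
        (fun c i =>
          if PySem.List.slice tl (some i) (some (i + (n : Int))) = shift then c + 1 else c)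
        c) (0 : Int)

-- ===== PORT B =====
-- literal port of B: one pass over the window positions; each window is rotated
-- back over all shifts and compared with p directly
def count_alt (p : String) (text : String) : Int :=
  let pl := p.toList
  let tl := text.toList
  let n := pl.length
  (PySem.List.pyRange 0 ((tl.length : Int) - (n : Int) + 1) 1).foldl
    (fun out i =>
      let w := PySem.List.slice tl (some i) (some (i + (n : Int)))
      if n ≠ 0 ∧ (PySem.List.pyRange 0 (n : Int) 1).any
          (fun k => decide (PySem.List.slice w (some k) none ++ PySem.List.slice w none (some k) = pl))
      then out + 1 else out) 0

-- ===== PRECONDITION & SPEC =====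
def Spec_count (p : String) (text : String) (out : Int) : Prop := out = count_alt p text
instance (p : String) (text : String) (out : Int) : Decidable (Spec_count p text out) := by unfold Spec_count; infer_instance

-- ===== CLAIM (what is proved, stated in full; the proofs are below) =====
def Claim_equal_count : Prop := ∀ (p : String) (text : String), Dom_count p text → Spec_count p text (count p text)

-- ===== LEMMAS AND PROOFS =====

-- a bounded rotation index witnesses IsRotated, and conversely (reduce mod length)
lemma exists_rot_iff_isRotated {α : Type} (a b : List α) (h : 0 < a.length) :
    (∃ j : Nat, j < a.length ∧ a.rotate j = b) ↔ a.IsRotated b := by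
  constructor
  · rintro ⟨j, _, hj⟩; exact ⟨j, hj⟩
  · rintro ⟨m, hm⟩
    exact ⟨m % a.length, Nat.mod_lt _ h, by rw [List.rotate_mod]; exact hm⟩

-- the rotation relation read from either side, with the index bounded by n
lemma rot_symm_iff {α : Type} (a b : List α) (n : Nat)
    (ha : a.length = n) (hb : b.length = n) (hn : 0 < n) :
    (∃ j : Nat, j < n ∧ a.rotate j = b) ↔ (∃ k : Nat, k < n ∧ b.rotate k = a) := by
  have h1 := exists_rot_iff_isRotated a b (by omega)
  have h2 := exists_rot_iff_isRotated b a (by omega)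
  constructor
  · rintro ⟨j, hj, hr⟩
    obtain ⟨k, hk, hk2⟩ := h2.mpr (h1.mp ⟨j, by omega, hr⟩).symm
    exact ⟨k, by omega, hk2⟩
  · rintro ⟨k, hk, hr⟩
    obtain ⟨j, hj, hj2⟩ := h1.mpr (h2.mp ⟨k, by omega, hr⟩).symm
    exact ⟨j, by omega, hj2⟩

-- drop ++ take at a nonnegative Int index is List.rotate
lemma slice_rot_eq_rotate {α : Type} (xs : List α) (j : Int) (h0 : 0 ≤ j)
    (hle : j.toNat ≤ xs.length) :
    PySem.List.slice xs (some j) none ++ PySem.List.slice xs none (some j)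
      = xs.rotate j.toNat := by
  rw [PySem.List.slice_from xs h0, PySem.List.slice_to xs h0,
    List.rotate_eq_drop_append_take hle]

-- over a duplicate-free list, the 0/1-sum of "x = sh" is the membership indicator
lemma sum_ite_eq_mem {β : Type} [DecidableEq β] (x : β) (S : List β) (hS : S.Nodup) :
    (S.map (fun sh => if x = sh then (1 : Int) else 0)).sum = if x ∈ S then 1 else 0 := by
  induction S with
  | nil => simp
  | cons sh S' ih =>
    rcases List.nodup_cons.mp hS with ⟨hn, hS'⟩
    simp only [List.map_cons, List.sum_cons, ih hS', List.mem_cons]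
    by_cases hx : x = sh
    · subst hx; simp [hn]
    · simp [hx]

-- swap the two summations: summing per-rotation match counts over a duplicate-free
-- rotation list equals counting positions whose window is one of the rotations
lemma sum_counts_eq_count_mem {α β : Type} [DecidableEq β] (f : α → β) (S : List β)
    (hS : S.Nodup) (I : List α) :
    (S.map (fun sh => ((I.countP (fun i => decide (f i = sh)) : Nat) : Int))).sum
      = ((I.countP (fun i => decide (f i ∈ S)) : Nat) : Int) := by
  induction I with
  | nil => simp
  | cons a I' ih =>
    have hsplit : ∀ sh : β,
        ((((a :: I').countP (fun i => decide (f i = sh)) : Nat)) : Int)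
          = (if f a = sh then (1 : Int) else 0)
            + ((I'.countP (fun i => decide (f i = sh)) : Nat) : Int) := by
      intro sh
      by_cases h : f a = sh <;> simp [h]; ring
    calc (S.map (fun sh => (((a :: I').countP (fun i => decide (f i = sh)) : Nat) : Int))).sum
        = (S.map (fun sh => (if f a = sh then (1 : Int) else 0)
            + ((I'.countP (fun i => decide (f i = sh)) : Nat) : Int))).sum := by
          congr 1; exact List.map_congr_left (fun sh _ => hsplit sh)
      _ = (S.map (fun sh => if f a = sh then (1 : Int) else 0)).sum
            + (S.map (fun sh => ((I'.countP (fun i => decide (f i = sh)) : Nat) : Int))).sum :=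
          PySem.List.sum_map_add_int S _ _
      _ = (if f a ∈ S then 1 else 0)
            + ((I'.countP (fun i => decide (f i ∈ S)) : Nat) : Int) := by
          rw [sum_ite_eq_mem (f a) S hS, ih]
      _ = (((a :: I').countP (fun i => decide (f i ∈ S)) : Nat) : Int) := by
          by_cases h : f a ∈ S <;> simp [h]; ring

-- an Int-indexed rotation existential over pyRange is the bounded Nat one
lemma exists_pyRange_rot_iff {α : Type} (a b : List α) (n : Nat) (ha : a.length = n) :
    (∃ j : Int, j ∈ PySem.List.pyRange 0 (n : Int) 1 ∧
        PySem.List.slice a (some j) none ++ PySem.List.slice a none (some j) = b)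
      ↔ (∃ j : Nat, j < n ∧ a.rotate j = b) := by
  constructor
  · rintro ⟨j, hj, hrot⟩
    rcases (PySem.List.mem_pyRange_one).mp hj with ⟨h0, hlt⟩
    exact ⟨j.toNat, by omega, by rw [← slice_rot_eq_rotate a j h0 (by omega)]; exact hrot⟩
  · rintro ⟨j, hj, hrot⟩
    refine ⟨(j : Int), (PySem.List.mem_pyRange_one).mpr ⟨by omega, by omega⟩, ?_⟩
    rw [slice_rot_eq_rotate a (j : Int) (by omega) (by simpa using Nat.le_of_lt (ha ▸ hj))]
    simpa using hrot

-- membership of the window in the rotation set of p equals B's rotate-back test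
lemma mem_rot_iff_any (pl w : List Char) (n : Nat)
    (hp : pl.length = n) (hw : w.length = n) (hn : 0 < n) :
    (∃ j : Int, j ∈ PySem.List.pyRange 0 (n : Int) 1 ∧
        PySem.List.slice pl (some j) none ++ PySem.List.slice pl none (some j) = w)
      ↔ ((PySem.List.pyRange 0 (n : Int) 1).any
          (fun k => decide (PySem.List.slice w (some k) none ++ PySem.List.slice w none (some k) = pl)) = true) := by
  rw [exists_pyRange_rot_iff pl w n hp, rot_symm_iff pl w n hp hw hn, List.any_eq_true]
  constructor
  · rintro ⟨k, hk, hrot⟩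
    refine ⟨(k : Int), (PySem.List.mem_pyRange_one).mpr ⟨by omega, by omega⟩, ?_⟩
    rw [decide_eq_true_iff, slice_rot_eq_rotate w (k : Int) (by omega) (by omega)]
    simpa using hrot
  · rintro ⟨k, hk, hdec⟩
    rcases (PySem.List.mem_pyRange_one).mp hk with ⟨h0, hlt⟩
    refine ⟨k.toNat, by omega, ?_⟩
    rw [← slice_rot_eq_rotate w k h0 (by omega)]
    exact decide_eq_true_iff.mp hdec

-- ===== VERDICT (by name: the statement is the Claim_ definition above) =====
theorem count_spec : Claim_equal_count := by
  intro p text _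
  unfold Spec_count
  simp only [count, count_alt]
  set pl := p.toList with hpl
  set tl := text.toList with htl
  set n := pl.length with hn
  set f : Int → List Char :=
    fun i => PySem.List.slice tl (some i) (some (i + (n : Int))) with hf
  set Rl : List (List Char) := (PySem.List.pyRange 0 (n : Int) 1).map
    (fun i => PySem.List.slice pl (some i) none ++ PySem.List.slice pl none (some i)) with hRl
  set S : PySem.Set (List Char) := PySem.Set.ofList Rl with hS
  set I : List Int := PySem.List.pyRange 0 ((tl.length : Int) - (n : Int) + 1) 1 with hI
  set Q : Int → Prop := fun i => n ≠ 0 ∧ ((PySem.List.pyRange 0 (n : Int) 1).any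
      (fun k => decide (PySem.List.slice (f i) (some k) none ++ PySem.List.slice (f i) none (some k) = pl)) = true) with hQ
  have hB : I.foldl (fun out i => if Q i then out + 1 else out) 0
      = ((I.countP (fun i => decide (Q i)) : Nat) : Int) := by
    rw [PySem.List.foldl_ite_add_one Q I 0]; ring
  show _ = I.foldl (fun out i => if Q i then out + 1 else out) 0
  rw [hB]
  by_cases hguard : n = 0 ∨ tl.length = 0
  · rw [if_pos hguard]
    rcases Nat.eq_zero_or_pos n with h0 | hpos
    · -- p empty: B's inner test is guarded by n ≠ 0 and never fires
      have : I.countP (fun i => decide (Q i)) = 0 := by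
        apply List.countP_eq_zero.mpr
        intro i _
        simp [hQ, h0]
      rw [this]; simp
    · -- text empty (and p nonempty): no window positions
      have h0 : tl.length = 0 := by omega
      have hInil : I = [] := by
        rw [hI]; exact PySem.List.pyRange_one_eq_nil (by omega)
      rw [hInil]; simp
  · rw [if_neg hguard]
    obtain ⟨hn0, htl0⟩ := not_or.mp hguard
    have hnd : S.Nodup := PySem.Set.nodup_ofList _
    have hinner : ∀ c : Int, ∀ sh : List Char,
        I.foldl (fun c i => if f i = sh then c + 1 else c) c
          = c + ((I.countP (fun i => decide (f i = sh)) : Nat) : Int) :=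
      fun c sh => PySem.List.foldl_ite_add_one (fun i => f i = sh) I c
    have hfun : (fun (c : Int) (shift : List Char) =>
        I.foldl (fun c i => if f i = shift then c + 1 else c) c)
          = (fun (c : Int) (shift : List Char) =>
        c + ((I.countP (fun i => decide (f i = shift)) : Nat) : Int)) := by
      funext c sh; exact hinner c sh
    have hA : S.foldl (fun c shift => I.foldl (fun c i => if f i = shift then c + 1 else c) c) 0
        = ((I.countP (fun i => decide (f i ∈ S)) : Nat) : Int) := by
      calc S.foldl (fun c shift => I.foldl (fun c i => if f i = shift then c + 1 else c) c) 0
          = S.foldl (fun c shift => c + ((I.countP (fun i => decide (f i = shift)) : Nat) : Int)) 0 := by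
            rw [hfun]
        _ = 0 + (S.map (fun sh => ((I.countP (fun i => decide (f i = sh)) : Nat) : Int))).sum :=
            PySem.List.foldl_add S _ 0
        _ = ((I.countP (fun i => decide (f i ∈ S)) : Nat) : Int) := by
            rw [zero_add, sum_counts_eq_count_mem f S hnd I]
            congr 1
            exact List.countP_congr (fun i _ => by simp)
    rw [hA]
    congr 1
    apply List.countP_congr
    intro i hi
    rcases (PySem.List.mem_pyRange_one).mp (hI ▸ hi) with ⟨hi0, hilt⟩
    have hwlen : (f i).length = n := by
      simp only [hf]
      rw [PySem.List.slice_toNat tl hi0 (by omega)]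
      simp only [List.length_take, List.length_drop]
      omega
    have hmem : (f i ∈ S) ↔ (∃ j : Int, j ∈ PySem.List.pyRange 0 (n : Int) 1 ∧
        PySem.List.slice pl (some j) none ++ PySem.List.slice pl none (some j) = f i) := by
      rw [hS, PySem.Set.mem_ofList, hRl, List.mem_map]
    have := mem_rot_iff_any pl (f i) n rfl hwlen (by omega)
    simp only [decide_eq_true_eq]
    rw [hmem, this, hQ]
    constructor
    · intro h; exact ⟨hn0, h⟩
    · rintro ⟨_, h⟩; exact h
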